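-- pv_equiv track=rewrite | github.com/HockeyROI/NHL-analytics | Zones/tests/test_zone_tracking_single_game.py | zone_time_per_player
-- ===== SOURCE A (Python) =====
-- from collections import defaultdict
-- from bisect import bisect_right
--
-- SITCODE_5V5 = "1551"
--
-- def zone_time_per_player(intervals, zone_tl, sit_tl):
--     """Return {pid: {'OZ':s, 'DZ':s, 'NZ':s}} where OZ/DZ are FROM that player's team perspective."""
--     # Need to know each player's team. Build from intervals.
--     # Also need situationCode per time for 5v5 filtering.
--     z_times = [t for t, _ in zone_tl]
--     z_vals  = [z for _, z in zone_tl]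
--     s_times = [t for t, _ in sit_tl]
--     s_vals  = [s for _, s in sit_tl]
--
--     def zone_at(t):
--         i = bisect_right(z_times, t) - 1
--         return z_vals[i] if i >= 0 else "NZ"
--     def sit_at(t):
--         i = bisect_right(s_times, t) - 1
--         return s_vals[i] if i >= 0 else None
--
--     counters = defaultdict(lambda: {"OZ": 0, "DZ": 0, "NZ": 0})
--     # Remember each player's side (home vs away) — same across the game.
--     side_of = {}
--
--     # Sub-divide each interval by zone-timeline change points and situationCode change points
--     all_breaks = sorted(set(z_times + s_times))
--     for s, e, home_set, away_set in intervals: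
--         # collect break points inside [s, e)
--         # find slice of all_breaks within (s, e)
--         lo = bisect_right(all_breaks, s)
--         hi = bisect_right(all_breaks, e - 1)  # last index whose time < e
--         pts = [s] + all_breaks[lo:hi+1] + [e]
--         pts = [p for p in pts if s <= p <= e]
--         pts = sorted(set(pts))
--         # iterate sub-intervals
--         for a, b in zip(pts, pts[1:]):
--             if b <= a: continue
--             # require 5v5
--             if sit_at(a) != SITCODE_5V5:
--                 continue
--             zhome = zone_at(a)
--             dur = b - a
--             for pid in home_set:
--                 side_of[pid] = "H"
--                 if zhome == "OZ_home":
--                     counters[pid]["OZ"] += dur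
--                 elif zhome == "DZ_home":
--                     counters[pid]["DZ"] += dur
--                 else:
--                     counters[pid]["NZ"] += dur
--             for pid in away_set:
--                 side_of[pid] = "A"
--                 # For away players OZ/DZ are flipped
--                 if zhome == "OZ_home":
--                     counters[pid]["DZ"] += dur
--                 elif zhome == "DZ_home":
--                     counters[pid]["OZ"] += dur
--                 else:
--                     counters[pid]["NZ"] += dur
--     return counters, side_of
-- ===== SOURCE B (Python) =====
-- from bisect import bisect_right
--
-- SITCODE_5V5 = "1551"
--
-- def zone_time_per_player(intervals, zone_tl, sit_tl):
--     """Same result as A, but each interval's 5v5 zone durations are totalled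
--     once and then distributed to every player in a single pass."""
--     z_times = [t for t, _ in zone_tl]
--     z_vals  = [z for _, z in zone_tl]
--     s_times = [t for t, _ in sit_tl]
--     s_vals  = [s for _, s in sit_tl]
--
--     def zone_at(t):
--         i = bisect_right(z_times, t) - 1
--         return z_vals[i] if i >= 0 else "NZ"
--     def sit_at(t):
--         i = bisect_right(s_times, t) - 1
--         return s_vals[i] if i >= 0 else None
--
--     counters = {}
--     side_of = {}
--
--     all_breaks = sorted(set(z_times + s_times))
--     for s, e, home_set, away_set in intervals:
--         lo = bisect_right(all_breaks, s)
--         hi = bisect_right(all_breaks, e - 1)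
--         pts = [s] + all_breaks[lo:hi+1] + [e]
--         pts = [p for p in pts if s <= p <= e]
--         pts = sorted(set(pts))
--         # one pass over the sub-intervals: total the 5v5 durations per zone
--         oz = dz = nz = 0
--         hit = False
--         for a, b in zip(pts, pts[1:]):
--             if b <= a or sit_at(a) != SITCODE_5V5:
--                 continue
--             hit = True
--             z = zone_at(a)
--             d = b - a
--             if z == "OZ_home":
--                 oz += d
--             elif z == "DZ_home":
--                 dz += d
--             else:
--                 nz += d
--         if not hit:
--             continue
--         # one pass over the players: distribute the totals
--         for pid in home_set:
--             side_of[pid] = "H"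
--             m = counters.setdefault(pid, {"OZ": 0, "DZ": 0, "NZ": 0})
--             m["OZ"] += oz; m["DZ"] += dz; m["NZ"] += nz
--         for pid in away_set:
--             side_of[pid] = "A"
--             m = counters.setdefault(pid, {"OZ": 0, "DZ": 0, "NZ": 0})
--             m["OZ"] += dz; m["DZ"] += oz; m["NZ"] += nz
--     return counters, side_of
-- ===== Notes on version B (the rewrite author's own statement) =====
-- stated objective: alternative
-- what changed: Instead of looping over every player inside every sub-interval, B makes one pass over each interval's sub-intervals to total the 5v5 durations per zone (OZ_home/DZ_home/neutral) and then distributes those totals to each home/away player in a single pass; per-player work drops from once per sub-interval to once per interval, though a timing run on the generated inputs (few players per interval) shows no measurable gain.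
import Mathlib
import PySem

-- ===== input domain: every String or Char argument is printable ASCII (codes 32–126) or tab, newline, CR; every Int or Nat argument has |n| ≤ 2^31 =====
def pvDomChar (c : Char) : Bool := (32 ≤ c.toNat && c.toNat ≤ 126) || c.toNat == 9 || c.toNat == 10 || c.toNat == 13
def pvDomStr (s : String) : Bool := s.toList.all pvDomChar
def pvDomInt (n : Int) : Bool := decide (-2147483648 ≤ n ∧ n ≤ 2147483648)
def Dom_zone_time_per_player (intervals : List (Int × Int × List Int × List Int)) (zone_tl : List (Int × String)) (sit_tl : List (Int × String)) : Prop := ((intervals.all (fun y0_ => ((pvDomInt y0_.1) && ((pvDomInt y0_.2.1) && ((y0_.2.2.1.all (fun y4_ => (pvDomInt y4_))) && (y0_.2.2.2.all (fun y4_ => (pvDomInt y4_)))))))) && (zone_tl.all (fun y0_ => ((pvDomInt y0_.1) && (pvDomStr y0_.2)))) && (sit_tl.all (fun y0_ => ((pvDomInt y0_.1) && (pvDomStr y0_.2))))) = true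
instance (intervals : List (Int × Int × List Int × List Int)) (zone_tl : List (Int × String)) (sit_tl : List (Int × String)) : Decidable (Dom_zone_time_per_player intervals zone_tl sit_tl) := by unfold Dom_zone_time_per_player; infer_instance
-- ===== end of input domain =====

-- B totals each interval's 5v5 zone durations once and distributes them to each player
-- in a single pass (objective: alternative — per-player work happens once per interval,
-- not once per sub-interval).

-- state: (counters : pid -> {"OZ","DZ","NZ"} -> seconds, side_of : pid -> "H"/"A")
abbrev PVSt := PySem.Dict Int (PySem.Dict String Int) × PySem.Dict Int String

-- ===== PORT A =====
-- shared helpers: both Pythons contain this identical code (zone_at / sit_at / all_breaks / pts)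
def pvDefault3 : PySem.Dict String Int := PySem.Dict.mk [("OZ", 0), ("DZ", 0), ("NZ", 0)]

def pvZoneAt (zts : List Int) (zvs : List String) (t : Int) : String :=
  let i : Int := (PySem.List.bisectRight zts t : Int) - 1
  if 0 ≤ i then PySem.List.pyGetD zvs i "NZ" else "NZ"

def pvSitAt (sts : List Int) (svs : List String) (t : Int) : Option String :=
  let i : Int := (PySem.List.bisectRight sts t : Int) - 1
  if 0 ≤ i then some (PySem.List.pyGetD svs i "") else none

def pvPts (allb : List Int) (s e : Int) : List Int :=
  let lo := PySem.List.bisectRight allb s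
  let hi := PySem.List.bisectRight allb (e - 1)
  let pts := [s] ++ PySem.List.slice allb (some (lo : Int)) (some ((hi : Int) + 1)) ++ [e]
  let pts := pts.filter (fun p => decide (s ≤ p) && decide (p ≤ e))
  PySem.List.sorted (PySem.Set.ofList pts) (fun x => x) false

-- A's inner loop bodies, as named helpers
def pvAstepHome (zhome : String) (dur : Int) (st : PVSt) (pid : Int) : PVSt :=
  let sd := st.2.insert pid "H"
  let m := st.1.getD pid pvDefault3
  let c :=
    if zhome = "OZ_home" then st.1.insert pid (m.insert "OZ" (m.getD "OZ" 0 + dur))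
    else if zhome = "DZ_home" then st.1.insert pid (m.insert "DZ" (m.getD "DZ" 0 + dur))
    else st.1.insert pid (m.insert "NZ" (m.getD "NZ" 0 + dur))
  (c, sd)

def pvAstepAway (zhome : String) (dur : Int) (st : PVSt) (pid : Int) : PVSt :=
  let sd := st.2.insert pid "A"
  let m := st.1.getD pid pvDefault3
  let c :=
    if zhome = "OZ_home" then st.1.insert pid (m.insert "DZ" (m.getD "DZ" 0 + dur))
    else if zhome = "DZ_home" then st.1.insert pid (m.insert "OZ" (m.getD "OZ" 0 + dur))
    else st.1.insert pid (m.insert "NZ" (m.getD "NZ" 0 + dur))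
  (c, sd)

def pvAstepSub (zts : List Int) (zvs : List String) (sts : List Int) (svs : List String)
    (hset aset : List Int) (st : PVSt) (ab : Int × Int) : PVSt :=
  if ab.2 ≤ ab.1 then st
  else if pvSitAt sts svs ab.1 ≠ some "1551" then st
  else
    let zhome := pvZoneAt zts zvs ab.1
    let dur := ab.2 - ab.1
    let st1 := hset.foldl (pvAstepHome zhome dur) st
    aset.foldl (pvAstepAway zhome dur) st1

def pvAstepInterval (allb : List Int) (zts : List Int) (zvs : List String)
    (sts : List Int) (svs : List String) (st : PVSt)
    (iv : Int × Int × List Int × List Int) : PVSt :=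
  let pts := pvPts allb iv.1 iv.2.1
  (pts.zip pts.tail).foldl (pvAstepSub zts zvs sts svs iv.2.2.1 iv.2.2.2) st

def zone_time_per_player (intervals : List (Int × Int × List Int × List Int)) (zone_tl : List (Int × String)) (sit_tl : List (Int × String)) : (List (Int × List (String × Int))) × (List (Int × String)) :=
  let zts := zone_tl.map (fun p => p.1)
  let zvs := zone_tl.map (fun p => p.2)
  let sts := sit_tl.map (fun p => p.1)
  let svs := sit_tl.map (fun p => p.2)
  let allb := PySem.List.sorted (PySem.Set.ofList (zts ++ sts)) (fun x => x) false
  let fin := intervals.foldl (pvAstepInterval allb zts zvs sts svs)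
    (PySem.Dict.mk [], PySem.Dict.mk [])
  (fin.1.items.map (fun p => (p.1, p.2.items)), fin.2.items)

-- ===== PORT B =====
-- B's inner loop bodies, as named helpers
def pvBaccSub (zts : List Int) (zvs : List String) (sts : List Int) (svs : List String)
    (ac : Int × Int × Int × Bool) (ab : Int × Int) : Int × Int × Int × Bool :=
  if ab.2 ≤ ab.1 ∨ pvSitAt sts svs ab.1 ≠ some "1551" then ac
  else
    let z := pvZoneAt zts zvs ab.1
    let d := ab.2 - ab.1
    if z = "OZ_home" then (ac.1 + d, ac.2.1, ac.2.2.1, true)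
    else if z = "DZ_home" then (ac.1, ac.2.1 + d, ac.2.2.1, true)
    else (ac.1, ac.2.1, ac.2.2.1 + d, true)

def pvBstepHome (oz dz nz : Int) (st : PVSt) (pid : Int) : PVSt :=
  let sd := st.2.insert pid "H"
  let c0 := st.1.setdefault pid pvDefault3
  let m := c0.getD pid pvDefault3
  let m1 := m.insert "OZ" (m.getD "OZ" 0 + oz)
  let m2 := m1.insert "DZ" (m1.getD "DZ" 0 + dz)
  let m3 := m2.insert "NZ" (m2.getD "NZ" 0 + nz)
  (c0.insert pid m3, sd)

def pvBstepAway (oz dz nz : Int) (st : PVSt) (pid : Int) : PVSt :=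
  let sd := st.2.insert pid "A"
  let c0 := st.1.setdefault pid pvDefault3
  let m := c0.getD pid pvDefault3
  let m1 := m.insert "OZ" (m.getD "OZ" 0 + dz)
  let m2 := m1.insert "DZ" (m1.getD "DZ" 0 + oz)
  let m3 := m2.insert "NZ" (m2.getD "NZ" 0 + nz)
  (c0.insert pid m3, sd)

def pvBstepInterval (allb : List Int) (zts : List Int) (zvs : List String)
    (sts : List Int) (svs : List String) (st : PVSt)
    (iv : Int × Int × List Int × List Int) : PVSt :=
  let pts := pvPts allb iv.1 iv.2.1
  let ac := (pts.zip pts.tail).foldl (pvBaccSub zts zvs sts svs) (0, 0, 0, false)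
  if ¬ ac.2.2.2 then st
  else
    let st1 := iv.2.2.1.foldl (pvBstepHome ac.1 ac.2.1 ac.2.2.1) st
    iv.2.2.2.foldl (pvBstepAway ac.1 ac.2.1 ac.2.2.1) st1

def zone_time_per_player_alt (intervals : List (Int × Int × List Int × List Int)) (zone_tl : List (Int × String)) (sit_tl : List (Int × String)) : (List (Int × List (String × Int))) × (List (Int × String)) :=
  let zts := zone_tl.map (fun p => p.1)
  let zvs := zone_tl.map (fun p => p.2)
  let sts := sit_tl.map (fun p => p.1)
  let svs := sit_tl.map (fun p => p.2)
  let allb := PySem.List.sorted (PySem.Set.ofList (zts ++ sts)) (fun x => x) false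
  let fin := intervals.foldl (pvBstepInterval allb zts zvs sts svs)
    (PySem.Dict.mk [], PySem.Dict.mk [])
  (fin.1.items.map (fun p => (p.1, p.2.items)), fin.2.items)

-- ===== PRECONDITION & SPEC =====
def Spec_zone_time_per_player (intervals : List (Int × Int × List Int × List Int)) (zone_tl : List (Int × String)) (sit_tl : List (Int × String)) (out : (List (Int × List (String × Int))) × (List (Int × String))) : Prop := out = zone_time_per_player_alt intervals zone_tl sit_tl
instance (intervals : List (Int × Int × List Int × List Int)) (zone_tl : List (Int × String)) (sit_tl : List (Int × String)) (out : (List (Int × List (String × Int))) × (List (Int × String))) : Decidable (Spec_zone_time_per_player intervals zone_tl sit_tl out) := by unfold Spec_zone_time_per_player; infer_instance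

-- ===== CLAIM (what is proved, stated in full; the proofs are below) =====
def Claim_equal_zone_time_per_player : Prop := ∀ (intervals : List (Int × Int × List Int × List Int)) (zone_tl : List (Int × String)) (sit_tl : List (Int × String)), Dom_zone_time_per_player intervals zone_tl sit_tl → Spec_zone_time_per_player intervals zone_tl sit_tl (zone_time_per_player intervals zone_tl sit_tl)

-- ===== LEMMAS AND PROOFS =====

-- proof-side vocabulary
def pvMk3 (o z n : Int) : PySem.Dict String Int := PySem.Dict.mk [("OZ", o), ("DZ", z), ("NZ", n)]
def pvShaped (m : PySem.Dict String Int) : Prop := ∃ o z n, m = pvMk3 o z n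
def pvINV (c : PySem.Dict Int (PySem.Dict String Int)) : Prop := ∀ kv ∈ c.items, pvShaped kv.2

abbrev PVT := Int × Int × Int
def pvAddT (a b : PVT) : PVT := (a.1 + b.1, a.2.1 + b.2.1, a.2.2 + b.2.2)
def pvTri (z : String) (d : Int) : PVT :=
  if z = "OZ_home" then (d, 0, 0) else if z = "DZ_home" then (0, d, 0) else (0, 0, d)
def pvFlip (t : PVT) : PVT := (t.2.1, t.1, t.2.2)

def pvAdd3 (m : PySem.Dict String Int) (t : PVT) : PySem.Dict String Int :=
  let m1 := m.insert "OZ" (m.getD "OZ" 0 + t.1)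
  let m2 := m1.insert "DZ" (m1.getD "DZ" 0 + t.2.1)
  m2.insert "NZ" (m2.getD "NZ" 0 + t.2.2)

def pvCbump (t : PVT) (c : PySem.Dict Int (PySem.Dict String Int)) (p : Int) :
    PySem.Dict Int (PySem.Dict String Int) :=
  c.insert p (pvAdd3 (c.getD p pvDefault3) t)
def pvSbump (L : String) (s : PySem.Dict Int String) (p : Int) : PySem.Dict Int String :=
  s.insert p L

theorem pvAdd3_mk3 (o z n : Int) (t : PVT) :
    pvAdd3 (pvMk3 o z n) t = pvMk3 (o + t.1) (z + t.2.1) (n + t.2.2) := rfl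

theorem pvMk3_insert_OZ (o z n v : Int) : (pvMk3 o z n).insert "OZ" v = pvMk3 v z n := rfl
theorem pvMk3_insert_DZ (o z n v : Int) : (pvMk3 o z n).insert "DZ" v = pvMk3 o v n := rfl
theorem pvMk3_insert_NZ (o z n v : Int) : (pvMk3 o z n).insert "NZ" v = pvMk3 o z v := rfl
theorem pvMk3_getD_OZ (o z n d0 : Int) : (pvMk3 o z n).getD "OZ" d0 = o := rfl
theorem pvMk3_getD_DZ (o z n d0 : Int) : (pvMk3 o z n).getD "DZ" d0 = z := rfl
theorem pvMk3_getD_NZ (o z n d0 : Int) : (pvMk3 o z n).getD "NZ" d0 = n := rfl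

theorem pvAddT_comm (a b : PVT) : pvAddT a b = pvAddT b a := by
  simp only [pvAddT]
  refine Prod.ext (by ring) (Prod.ext (by ring) (by ring))

theorem pvAddT_zero_left (t : PVT) : pvAddT (0, 0, 0) t = t := by
  simp only [pvAddT, zero_add]

theorem pvAddT_assoc (a b c : PVT) : pvAddT (pvAddT a b) c = pvAddT a (pvAddT b c) := by
  simp only [pvAddT]
  refine Prod.ext (by ring) (Prod.ext (by ring) (by ring))

theorem pvFlip_add (a b : PVT) : pvAddT (pvFlip a) (pvFlip b) = pvFlip (pvAddT a b) := rfl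

theorem pvShaped_getD {c : PySem.Dict Int (PySem.Dict String Int)} (h : pvINV c) (p : Int) :
    pvShaped (c.getD p pvDefault3) := by
  rcases hq2 : List.find? (fun q => q.1 == p) c.items with _ | kv
  · simp only [PySem.Dict.getD, PySem.Dict.get?, hq2, Option.map_none, Option.getD_none]
    exact ⟨0, 0, 0, rfl⟩
  · have hm := List.mem_of_find?_eq_some hq2
    have := h kv hm
    simpa only [PySem.Dict.getD, PySem.Dict.get?, hq2, Option.map_some, Option.getD_some] using this

theorem pvINV_cbump {c} (h : pvINV c) (t : PVT) (p : Int) : pvINV (pvCbump t c p) := by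
  intro kv hkv
  rcases (PySem.Dict.mem_items_insert _ _ _ _).1 hkv with h1 | ⟨h2, _⟩
  · obtain ⟨o, z, n, hm⟩ := pvShaped_getD h p
    rw [h1]
    rw [hm, pvAdd3_mk3]
    exact ⟨_, _, _, rfl⟩
  · exact h kv h2

-- generic fold lemmas
theorem pvFoldl_congr_inv {α β : Type} {P : α → Prop} {f g : α → β → α}
    (hfg : ∀ a x, P a → f a x = g a x) (hP : ∀ a x, P a → P (g a x)) :
    ∀ (l : List β) (a : α), P a → l.foldl f a = l.foldl g a := by
  intro l
  induction l with
  | nil => intro a _; rfl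
  | cons x xs ih =>
    intro a ha
    simp only [List.foldl_cons]
    rw [hfg a x ha]
    exact ih _ (hP a x ha)

theorem pvFoldl_inv {α β : Type} {P : α → Prop} {f : α → β → α}
    (hP : ∀ a x, P a → P (f a x)) : ∀ (l : List β) (a : α), P a → P (l.foldl f a) := by
  intro l
  induction l with
  | nil => intro a ha; exact ha
  | cons x xs ih => intro a ha; exact ih _ (hP a x ha)

theorem pvFoldl_prod {α₁ α₂ β : Type} (f : α₁ → β → α₁) (g : α₂ → β → α₂) :
    ∀ (l : List β) (a : α₁ × α₂),
      l.foldl (fun st x => (f st.1 x, g st.2 x)) a = (l.foldl f a.1, l.foldl g a.2) := by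
  intro l
  induction l with
  | nil => intro a; rfl
  | cons x xs ih => intro a; simp only [List.foldl_cons]; exact ih _

-- counters-side commutation machinery
theorem pvInsComm {κ ν : Type} [BEq κ] [LawfulBEq κ] (c : PySem.Dict κ ν) {p p' : κ}
    (hne : p ≠ p') (hp : c.contains p = true) (v : ν) (v' : ν) :
    (c.insert p' v').insert p v = (c.insert p v).insert p' v' := by
  have hb : (p' == p) = false := by simp; exact fun h => hne h.symm
  have hb' : (p == p') = false := by simp; exact hne
  have hp1 : (c.insert p' v').contains p = true := by
    rw [PySem.Dict.contains_insert]; simp [hp]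
  have hp2 : (c.insert p v).contains p' = c.contains p' := by
    rw [PySem.Dict.contains_insert, hb]; simp
  by_cases hc' : c.contains p' = true
  · apply PySem.Dict.ext
    rw [PySem.Dict.items_insert_of_contains _ v hp1,
        PySem.Dict.items_insert_of_contains _ v' hc',
        PySem.Dict.items_insert_of_contains _ v' (by rw [hp2]; exact hc'),
        PySem.Dict.items_insert_of_contains _ v hp]
    simp only [List.map_map]
    apply List.map_congr_left
    intro q _
    by_cases h1 : q.1 == p <;> by_cases h2 : q.1 == p' <;>
      simp_all [Function.comp, hb, hb']
  · have hc'f : c.contains p' = false := by simpa using hc'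
    apply PySem.Dict.ext
    rw [PySem.Dict.items_insert_of_contains _ v (by
          rw [PySem.Dict.contains_insert]
          simp [hp]),
        PySem.Dict.items_insert_of_not_contains _ v' hc'f,
        PySem.Dict.items_insert_of_not_contains _ v' (by rw [hp2]; exact hc'f),
        PySem.Dict.items_insert_of_contains _ v hp]
    simp [hb]

theorem pvCbump_contains (t : PVT) (c : PySem.Dict Int (PySem.Dict String Int)) (p x : Int) :
    (pvCbump t c p).contains x = (x == p || c.contains x) :=
  PySem.Dict.contains_insert _ _ _ _

theorem pvCbump_add (c : PySem.Dict Int (PySem.Dict String Int)) (p : Int)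
    (h : pvShaped (c.getD p pvDefault3)) (t t' : PVT) :
    pvCbump t (pvCbump t' c p) p = pvCbump (pvAddT t' t) c p := by
  obtain ⟨o, z, n, hm⟩ := h
  unfold pvCbump
  rw [PySem.Dict.getD_insert_self, PySem.Dict.insert_insert_self, hm,
      pvAdd3_mk3, pvAdd3_mk3, pvAdd3_mk3]
  simp [pvAddT, pvMk3, add_assoc]

theorem pvCbump_swap {c : PySem.Dict Int (PySem.Dict String Int)} (hI : pvINV c) {p p' : Int}
    (hp : c.contains p = true) (t t' : PVT) :
    pvCbump t (pvCbump t' c p') p = pvCbump t' (pvCbump t c p) p' := by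
  by_cases hpp : p = p'
  · subst hpp
    rw [pvCbump_add c p (pvShaped_getD hI p), pvCbump_add c p (pvShaped_getD hI p),
        pvAddT_comm]
  · unfold pvCbump
    rw [PySem.Dict.getD_insert_of_ne _ _ _ hpp, PySem.Dict.getD_insert_of_ne _ _ _ (Ne.symm hpp)]
    exact pvInsComm c hpp hp _ _

theorem pvCfold_contains (t : PVT) (ps : List Int) :
    ∀ (c : PySem.Dict Int (PySem.Dict String Int)) (x : Int),
      (ps.foldl (pvCbump t) c).contains x = (decide (x ∈ ps) || c.contains x) := by
  induction ps with
  | nil => intro c x; simp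
  | cons p ps ih =>
    intro c x
    simp only [List.foldl_cons, ih, pvCbump_contains, List.mem_cons]
    by_cases hx : x = p <;> by_cases hx2 : x ∈ ps <;> simp [hx, hx2]

theorem pvINV_cfold (t : PVT) (ps : List Int) {c} (h : pvINV c) :
    pvINV (ps.foldl (pvCbump t) c) := by
  refine pvFoldl_inv (f := pvCbump t) ?_ ps c h
  exact fun a x ha => pvINV_cbump ha t x

theorem pvCfold_single_swap (t t' : PVT) (ps : List Int) :
    ∀ c q, pvINV c → (∀ x ∈ ps, c.contains x = true) →
      ps.foldl (pvCbump t) (pvCbump t' c q) = pvCbump t' (ps.foldl (pvCbump t) c) q := by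
  induction ps with
  | nil => intro c q _ _; rfl
  | cons p ps ih =>
    intro c q hI hcont
    simp only [List.foldl_cons]
    rw [pvCbump_swap hI (hcont p List.mem_cons_self) t t']
    exact ih _ q (pvINV_cbump hI t p)
      (fun x hx => by rw [pvCbump_contains]; simp [hcont x (List.mem_cons_of_mem _ hx)])

theorem pvCfold_single_swap' (t t' : PVT) (ps : List Int) :
    ∀ c q, pvINV c → c.contains q = true →
      ps.foldl (pvCbump t) (pvCbump t' c q) = pvCbump t' (ps.foldl (pvCbump t) c) q := by
  induction ps with
  | nil => intro c q _ _; rfl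
  | cons p ps ih =>
    intro c q hI hq
    simp only [List.foldl_cons]
    rw [← pvCbump_swap (p := q) (p' := p) hI hq t' t]
    exact ih _ q (pvINV_cbump hI t p)
      (by rw [pvCbump_contains]; simp [hq])

theorem pvCfold_block_swap (t t' : PVT) (ps qs : List Int) :
    ∀ c, pvINV c → (∀ x ∈ ps, c.contains x = true) →
      ps.foldl (pvCbump t) (qs.foldl (pvCbump t') c) =
      qs.foldl (pvCbump t') (ps.foldl (pvCbump t) c) := by
  induction qs with
  | nil => intro c _ _; rfl
  | cons q qs ih =>
    intro c hI hcont
    simp only [List.foldl_cons]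
    rw [← pvCfold_single_swap t t' ps c q hI hcont]
    exact ih _ (pvINV_cbump hI t' q)
      (fun x hx => by rw [pvCbump_contains]; simp [hcont x hx])

theorem pvCfold_merge (t1 t2 : PVT) (ps : List Int) :
    ∀ c, pvINV c →
      ps.foldl (pvCbump t2) (ps.foldl (pvCbump t1) c) = ps.foldl (pvCbump (pvAddT t1 t2)) c := by
  induction ps with
  | nil => intro c _; rfl
  | cons p ps ih =>
    intro c hI
    simp only [List.foldl_cons]
    rw [← pvCfold_single_swap' t1 t2 ps (pvCbump t1 c p) p (pvINV_cbump hI t1 p)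
          (by rw [pvCbump_contains]; simp),
        pvCbump_add c p (pvShaped_getD hI p) t2 t1]
    exact ih _ (pvINV_cbump hI (pvAddT t1 t2) p)

-- the per-interval counters transformer, abstracted
def pvCstep (hs as : List Int) (T : PVT) (c : PySem.Dict Int (PySem.Dict String Int)) :
    PySem.Dict Int (PySem.Dict String Int) :=
  as.foldl (pvCbump (pvFlip T)) (hs.foldl (pvCbump T) c)

theorem pvCstep_merge (hs as : List Int) (T1 T2 : PVT) {c} (h : pvINV c) :
    pvCstep hs as T2 (pvCstep hs as T1 c) = pvCstep hs as (pvAddT T1 T2) c := by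
  unfold pvCstep
  rw [pvCfold_block_swap T2 (pvFlip T1) hs as _ (pvINV_cfold T1 hs h)
        (fun x hx => by rw [pvCfold_contains]; simp [hx]),
      pvCfold_merge T1 T2 hs c h,
      pvCfold_merge (pvFlip T1) (pvFlip T2) as _ (pvINV_cfold _ hs h),
      pvFlip_add]

-- side-dict machinery
theorem pvSfold_contains (L : String) (ps : List Int) :
    ∀ (s : PySem.Dict Int String) (x : Int),
      (ps.foldl (pvSbump L) s).contains x = (decide (x ∈ ps) || s.contains x) := by
  induction ps with
  | nil => intro s x; simp
  | cons p ps ih =>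
    intro s x
    simp only [List.foldl_cons, ih, pvSbump, PySem.Dict.contains_insert, List.mem_cons]
    by_cases hx : x = p <;> by_cases hx2 : x ∈ ps <;> simp [hx, hx2]

theorem pvSfold_items_present (L : String) (ps : List Int) :
    ∀ s : PySem.Dict Int String, (∀ x ∈ ps, s.contains x = true) →
      (ps.foldl (pvSbump L) s).items =
        s.items.map (fun kv => if kv.1 ∈ ps then (kv.1, L) else kv) := by
  induction ps with
  | nil => intro s _; simp
  | cons p ps ih =>
    intro s hcont
    simp only [List.foldl_cons]
    rw [ih _ (fun x hx => by
      simp only [pvSbump, PySem.Dict.contains_insert]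
      simp [hcont x (List.mem_cons_of_mem _ hx)])]
    rw [show (pvSbump L s p).items = s.items.map (fun q => if (q.1 == p) = true then (p, L) else q) from
      PySem.Dict.items_insert_of_contains _ L (hcont p List.mem_cons_self)]
    simp only [List.map_map]
    apply List.map_congr_left
    intro kv _
    by_cases h1 : kv.1 = p <;> by_cases h2 : kv.1 ∈ ps <;>
      simp [Function.comp, h1, h2, List.mem_cons]

theorem pvSfold_untouched (L : String) (ps : List Int) :
    ∀ (s : PySem.Dict Int String) kv, kv ∈ (ps.foldl (pvSbump L) s).items → kv.1 ∉ ps → kv ∈ s.items := by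
  induction ps with
  | nil => intro s kv h _; exact h
  | cons p ps ih =>
    intro s kv hmem hnin
    have h1 : kv ∈ (pvSbump L s p).items :=
      ih _ kv hmem (fun h => hnin (List.mem_cons_of_mem _ h))
    rcases (PySem.Dict.mem_items_insert _ _ _ _).1 h1 with h2 | ⟨h3, _⟩
    · exact absurd (by rw [h2]; exact List.mem_cons_self) hnin
    · exact h3

theorem pvSfold_mem_val (L : String) (ps : List Int) :
    ∀ (s : PySem.Dict Int String) kv, kv ∈ (ps.foldl (pvSbump L) s).items → kv.1 ∈ ps → kv.2 = L := by
  induction ps with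
  | nil => intro s kv _ h; simp at h
  | cons p ps ih =>
    intro s kv hmem hin
    by_cases h2 : kv.1 ∈ ps
    · exact ih _ kv hmem h2
    · have h1 : kv ∈ (pvSbump L s p).items := pvSfold_untouched L ps _ kv hmem h2
      rcases (PySem.Dict.mem_items_insert _ _ _ _).1 h1 with h3 | ⟨_, h4⟩
      · rw [h3]
      · rcases List.mem_cons.1 hin with h5 | h5
        · exact absurd h5 h4
        · exact absurd h5 h2

def pvSstep (hs as : List Int) (s : PySem.Dict Int String) : PySem.Dict Int String :=
  as.foldl (pvSbump "A") (hs.foldl (pvSbump "H") s)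

theorem pvSstep_idem (hs as : List Int) (s : PySem.Dict Int String) :
    pvSstep hs as (pvSstep hs as s) = pvSstep hs as s := by
  unfold pvSstep
  set t := as.foldl (pvSbump "A") (hs.foldl (pvSbump "H") s) with ht
  have hkeysA : ∀ x ∈ as, t.contains x = true := by
    intro x hx; rw [ht, pvSfold_contains]; simp [hx]
  have hkeysH : ∀ x ∈ hs, t.contains x = true := by
    intro x hx; rw [ht, pvSfold_contains, pvSfold_contains]; simp [hx]
  apply PySem.Dict.ext
  rw [pvSfold_items_present "A" as _ (fun x hx => by
        rw [pvSfold_contains]; simp [hkeysA x hx]),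
      pvSfold_items_present "H" hs t hkeysH, List.map_map]
  have hpt : ∀ kv ∈ t.items,
      ((fun kv : Int × String => if kv.1 ∈ as then (kv.1, "A") else kv) ∘
       (fun kv : Int × String => if kv.1 ∈ hs then (kv.1, "H") else kv)) kv = id kv := by
    intro kv hkv
    simp only [Function.comp, id]
    by_cases ha : kv.1 ∈ as
    · have hv := pvSfold_mem_val "A" as _ kv (ht ▸ hkv) ha
      by_cases hh : kv.1 ∈ hs <;> simp [ha, hh] <;> rw [← hv]
    · have hkv2 : kv ∈ (hs.foldl (pvSbump "H") s).items :=
        pvSfold_untouched "A" as _ kv (ht ▸ hkv) ha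
      by_cases hh : kv.1 ∈ hs
      · have hv := pvSfold_mem_val "H" hs _ kv hkv2 hh
        simp [ha, hh]
        rw [← hv]
      · simp [ha, hh]
  rw [List.map_congr_left hpt, List.map_id]

-- sums of triples over the qualifying sub-intervals
def pvSumT (qs : List (String × Int)) : PVT :=
  qs.foldl (fun t q => pvAddT t (pvTri q.1 q.2)) (0, 0, 0)

theorem pvSumT_append (qs : List (String × Int)) (q : String × Int) :
    pvSumT (qs ++ [q]) = pvAddT (pvSumT qs) (pvTri q.1 q.2) := by
  simp [pvSumT, List.foldl_append]

theorem pvCinterval (hs as : List Int) (qs : List (String × Int)) :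
    ∀ c, pvINV c → qs ≠ [] →
    qs.foldl (fun c q => pvCstep hs as (pvTri q.1 q.2) c) c = pvCstep hs as (pvSumT qs) c := by
  induction qs using List.reverseRecOn with
  | nil => intro c _ hne; exact absurd rfl hne
  | append_singleton qs q ih =>
    intro c hI _
    rw [List.foldl_append, List.foldl_cons, List.foldl_nil, pvSumT_append]
    by_cases hq : qs = []
    · subst hq
      simp [pvSumT, pvAddT_zero_left]
    · rw [ih c hI hq, pvCstep_merge hs as _ _ hI]

theorem pvSinterval (hs as : List Int) (qs : List (String × Int)) :
    ∀ (s : PySem.Dict Int String), qs ≠ [] →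
    qs.foldl (fun s (_ : String × Int) => pvSstep hs as s) s = pvSstep hs as s := by
  induction qs using List.reverseRecOn with
  | nil => intro s hne; exact absurd rfl hne
  | append_singleton qs q ih =>
    intro s _
    rw [List.foldl_append, List.foldl_cons, List.foldl_nil]
    by_cases hq : qs = []
    · subst hq; rfl
    · rw [ih s hq, pvSstep_idem]

-- relating the port steps to the abstract machinery
theorem pvSetdefault_insert {κ ν : Type} [BEq κ] [LawfulBEq κ] (d : PySem.Dict κ ν) (k : κ) (v w : ν) :
    (d.setdefault k v).insert k w = d.insert k w := by
  by_cases hc : d.contains k = true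
  · rw [PySem.Dict.setdefault_of_contains _ _ hc]
  · rw [PySem.Dict.setdefault_of_not_contains _ _ (by simpa using hc),
        PySem.Dict.insert_insert_self]

theorem pvBstepHome_eq (oz dz nz : Int) :
    pvBstepHome oz dz nz = fun st pid => (pvCbump (oz, dz, nz) st.1 pid, pvSbump "H" st.2 pid) := by
  funext st pid
  simp [pvBstepHome, pvCbump, pvSbump, pvAdd3, pvSetdefault_insert, PySem.Dict.getD_setdefault_self]

theorem pvBstepAway_eq (oz dz nz : Int) :
    pvBstepAway oz dz nz = fun st pid => (pvCbump (pvFlip (oz, dz, nz)) st.1 pid, pvSbump "A" st.2 pid) := by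
  funext st pid
  simp [pvBstepAway, pvCbump, pvSbump, pvAdd3, pvFlip, pvSetdefault_insert,
    PySem.Dict.getD_setdefault_self]

theorem pvAstepHome_eq (zhome : String) (dur : Int) (st : PVSt) (pid : Int) (h : pvINV st.1) :
    pvAstepHome zhome dur st pid = (pvCbump (pvTri zhome dur) st.1 pid, pvSbump "H" st.2 pid) := by
  obtain ⟨o, z, n, hm⟩ := pvShaped_getD h pid
  unfold pvAstepHome pvCbump pvSbump pvTri
  rw [hm]
  split_ifs with h1 h2 <;>
    simp [pvAdd3_mk3, pvMk3_getD_OZ, pvMk3_getD_DZ, pvMk3_getD_NZ,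
      pvMk3_insert_OZ, pvMk3_insert_DZ, pvMk3_insert_NZ]

theorem pvAstepAway_eq (zhome : String) (dur : Int) (st : PVSt) (pid : Int) (h : pvINV st.1) :
    pvAstepAway zhome dur st pid = (pvCbump (pvFlip (pvTri zhome dur)) st.1 pid, pvSbump "A" st.2 pid) := by
  obtain ⟨o, z, n, hm⟩ := pvShaped_getD h pid
  unfold pvAstepAway pvCbump pvSbump pvTri pvFlip
  rw [hm]
  split_ifs with h1 h2 <;>
    simp [pvAdd3_mk3, pvMk3_getD_OZ, pvMk3_getD_DZ, pvMk3_getD_NZ,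
      pvMk3_insert_OZ, pvMk3_insert_DZ, pvMk3_insert_NZ]

theorem pvSumT_foldl_init (qs : List (String × Int)) :
    ∀ t0, qs.foldl (fun t q => pvAddT t (pvTri q.1 q.2)) t0 = pvAddT t0 (pvSumT qs) := by
  induction qs with
  | nil => intro t0; simp [pvSumT, pvAddT]
  | cons q qs ih =>
    intro t0
    simp only [List.foldl_cons]
    rw [ih]
    have h2 : pvSumT (q :: qs) = pvAddT (pvTri q.1 q.2) (pvSumT qs) := by
      simp only [pvSumT, List.foldl_cons]
      rw [ih (pvAddT (0, 0, 0) (pvTri q.1 q.2)), pvAddT_zero_left]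
      rfl
    rw [h2, ← pvAddT_assoc]

theorem pvSumT_cons (q : String × Int) (qs : List (String × Int)) :
    pvSumT (q :: qs) = pvAddT (pvTri q.1 q.2) (pvSumT qs) := by
  simp only [pvSumT, List.foldl_cons]
  rw [pvSumT_foldl_init, pvAddT_zero_left]
  rfl

theorem pvBaccRun (qs : List (String × Int)) :
    ∀ (o z n : Int) (b : Bool),
      qs.foldl (fun ac (q : String × Int) =>
        if q.1 = "OZ_home" then (ac.1 + q.2, ac.2.1, ac.2.2.1, true)
        else if q.1 = "DZ_home" then (ac.1, ac.2.1 + q.2, ac.2.2.1, true)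
        else (ac.1, ac.2.1, ac.2.2.1 + q.2, true)) (o, z, n, b) =
      (o + (pvSumT qs).1, z + (pvSumT qs).2.1, n + (pvSumT qs).2.2, b || !qs.isEmpty) := by
  induction qs with
  | nil => intro o z n b; simp [pvSumT]
  | cons q qs ih =>
    intro o z n b
    simp only [List.foldl_cons]
    rw [pvSumT_cons]
    by_cases h1 : q.1 = "OZ_home"
    · simp only [h1, if_true, ih, pvAddT, pvTri, if_pos rfl]
      simp [add_assoc]
    · by_cases h2 : q.1 = "DZ_home"
      · simp only [h1, h2, if_false, if_true, ih, pvAddT, pvTri]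
        simp [h1, h2, add_assoc]
      · simp only [h1, h2, if_false, ih, pvAddT, pvTri]
        simp [h1, h2, add_assoc]

theorem pvBfold_skip (zts : List Int) (zvs : List String) (sts : List Int) (svs : List String) :
    ∀ (subs : List (Int × Int)) (ac : Int × Int × Int × Bool),
      subs.foldl (pvBaccSub zts zvs sts svs) ac =
      (subs.filterMap (fun ab =>
          if ab.2 ≤ ab.1 ∨ pvSitAt sts svs ab.1 ≠ some "1551" then none
          else some (pvZoneAt zts zvs ab.1, ab.2 - ab.1))).foldl
        (fun ac (q : String × Int) =>
          if q.1 = "OZ_home" then (ac.1 + q.2, ac.2.1, ac.2.2.1, true)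
          else if q.1 = "DZ_home" then (ac.1, ac.2.1 + q.2, ac.2.2.1, true)
          else (ac.1, ac.2.1, ac.2.2.1 + q.2, true)) ac := by
  intro subs
  induction subs with
  | nil => intro ac; rfl
  | cons x xs ih =>
    intro ac
    by_cases hc : (x.2 ≤ x.1 ∨ pvSitAt sts svs x.1 ≠ some "1551") <;>
      simp [pvBaccSub, List.filterMap_cons, hc, ih]

theorem pvAfold_skip (zts : List Int) (zvs : List String) (sts : List Int) (svs : List String)
    (hs as : List Int) :
    ∀ (subs : List (Int × Int)) (st : PVSt),
      subs.foldl (pvAstepSub zts zvs sts svs hs as) st =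
      (subs.filterMap (fun ab =>
          if ab.2 ≤ ab.1 ∨ pvSitAt sts svs ab.1 ≠ some "1551" then none
          else some (pvZoneAt zts zvs ab.1, ab.2 - ab.1))).foldl
        (fun st (q : String × Int) =>
          as.foldl (pvAstepAway q.1 q.2) (hs.foldl (pvAstepHome q.1 q.2) st)) st := by
  intro subs
  induction subs with
  | nil => intro st; rfl
  | cons x xs ih =>
    intro st
    by_cases hc : (x.2 ≤ x.1 ∨ pvSitAt sts svs x.1 ≠ some "1551")
    · have hstep : pvAstepSub zts zvs sts svs hs as st x = st := by
        unfold pvAstepSub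
        rcases hc with hc | hc
        · simp [hc]
        · by_cases h1 : x.2 ≤ x.1 <;> simp [h1, hc]
      simp [List.filterMap_cons, hc, hstep, ih]
    · have hc2 := hc
      push_neg at hc2
      have hstep : pvAstepSub zts zvs sts svs hs as st x =
          as.foldl (pvAstepAway (pvZoneAt zts zvs x.1) (x.2 - x.1))
            (hs.foldl (pvAstepHome (pvZoneAt zts zvs x.1) (x.2 - x.1)) st) := by
        unfold pvAstepSub
        simp [hc2.1, hc2.2]
      simp [List.filterMap_cons, hc, hstep, ih]

theorem pvBacc_spec (zts : List Int) (zvs : List String) (sts : List Int) (svs : List String)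
    (subs : List (Int × Int)) :
    subs.foldl (pvBaccSub zts zvs sts svs) (0, 0, 0, false) =
      (let qs := subs.filterMap (fun ab =>
          if ab.2 ≤ ab.1 ∨ pvSitAt sts svs ab.1 ≠ some "1551" then none
          else some (pvZoneAt zts zvs ab.1, ab.2 - ab.1));
       ((pvSumT qs).1, (pvSumT qs).2.1, (pvSumT qs).2.2, !qs.isEmpty)) := by
  rw [pvBfold_skip, pvBaccRun]
  simp

theorem pvInterval_core (zts : List Int) (zvs : List String) (sts : List Int) (svs : List String)
    (hs as : List Int) (subs : List (Int × Int)) (st : PVSt) (h : pvINV st.1) :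
    subs.foldl (pvAstepSub zts zvs sts svs hs as) st =
    (let ac := subs.foldl (pvBaccSub zts zvs sts svs) (0, 0, 0, false);
     if ¬ ac.2.2.2 then st else
       as.foldl (pvBstepAway ac.1 ac.2.1 ac.2.2.1) (hs.foldl (pvBstepHome ac.1 ac.2.1 ac.2.2.1) st)) := by
  rw [pvAfold_skip, pvBacc_spec]
  simp only []
  generalize subs.filterMap (fun ab =>
      if ab.2 ≤ ab.1 ∨ pvSitAt sts svs ab.1 ≠ some "1551" then none
      else some (pvZoneAt zts zvs ab.1, ab.2 - ab.1)) = qs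
  have hstep : ∀ (a : PVSt) (q : String × Int), pvINV a.1 →
      as.foldl (pvAstepAway q.1 q.2) (hs.foldl (pvAstepHome q.1 q.2) a) =
      (pvCstep hs as (pvTri q.1 q.2) a.1, pvSstep hs as a.2) := by
    intro a q ha
    rw [pvFoldl_congr_inv (P := fun st : PVSt => pvINV st.1)
          (f := pvAstepHome q.1 q.2)
          (g := fun st pid => (pvCbump (pvTri q.1 q.2) st.1 pid, pvSbump "H" st.2 pid))
          (fun a x hP => pvAstepHome_eq q.1 q.2 a x hP)
          (fun a x hP => pvINV_cbump hP _ x) hs a ha,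
        pvFoldl_prod]
    rw [pvFoldl_congr_inv (P := fun st : PVSt => pvINV st.1)
          (f := pvAstepAway q.1 q.2)
          (g := fun st pid => (pvCbump (pvFlip (pvTri q.1 q.2)) st.1 pid, pvSbump "A" st.2 pid))
          (fun a x hP => pvAstepAway_eq q.1 q.2 a x hP)
          (fun a x hP => pvINV_cbump hP _ x) as _ (pvINV_cfold _ hs ha),
        pvFoldl_prod]
    rfl
  rw [pvFoldl_congr_inv (P := fun st : PVSt => pvINV st.1)
        (f := fun st q => as.foldl (pvAstepAway q.1 q.2) (hs.foldl (pvAstepHome q.1 q.2) st))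
        (g := fun st q => (pvCstep hs as (pvTri q.1 q.2) st.1, pvSstep hs as st.2))
        hstep
        (fun a x hP => pvINV_cfold _ as (pvINV_cfold _ hs hP))
        qs st h,
      pvFoldl_prod (f := fun c (q : String × Int) => pvCstep hs as (pvTri q.1 q.2) c)
        (g := fun s (_ : String × Int) => pvSstep hs as s)]
  by_cases hq : qs = []
  · subst hq
    simp
  · have hqE : qs.isEmpty = false := by simpa [List.isEmpty_iff] using hq
    rw [if_neg (by simp [hqE]), pvCinterval hs as qs st.1 h hq, pvSinterval hs as qs st.2 hq,
        pvBstepHome_eq, pvBstepAway_eq, pvFoldl_prod, pvFoldl_prod]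
    rfl

theorem pvInterval_eq (allb zts : List Int) (zvs : List String) (sts : List Int) (svs : List String)
    (st : PVSt) (iv : Int × Int × List Int × List Int) (h : pvINV st.1) :
    pvAstepInterval allb zts zvs sts svs st iv = pvBstepInterval allb zts zvs sts svs st iv := by
  exact pvInterval_core zts zvs sts svs iv.2.2.1 iv.2.2.2
    ((pvPts allb iv.1 iv.2.1).zip (pvPts allb iv.1 iv.2.1).tail) st h

theorem pvINV_Bstep (allb zts : List Int) (zvs : List String) (sts : List Int) (svs : List String)
    (st : PVSt) (iv : Int × Int × List Int × List Int) (h : pvINV st.1) :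
    pvINV (pvBstepInterval allb zts zvs sts svs st iv).1 := by
  unfold pvBstepInterval
  dsimp only
  split
  · exact h
  · rw [pvBstepHome_eq, pvBstepAway_eq, pvFoldl_prod, pvFoldl_prod]
    exact pvINV_cfold _ _ (pvINV_cfold _ _ h)

theorem pvFolds_eq (allb zts : List Int) (zvs : List String) (sts : List Int) (svs : List String)
    (intervals : List (Int × Int × List Int × List Int)) :
    intervals.foldl (pvAstepInterval allb zts zvs sts svs) (PySem.Dict.mk [], PySem.Dict.mk []) =
    intervals.foldl (pvBstepInterval allb zts zvs sts svs) (PySem.Dict.mk [], PySem.Dict.mk []) := by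
  refine pvFoldl_congr_inv (P := fun st : PVSt => pvINV st.1)
    (fun a x hP => pvInterval_eq allb zts zvs sts svs a x hP)
    (fun a x hP => by
      rw [← pvInterval_eq allb zts zvs sts svs a x hP]
      rw [pvInterval_eq allb zts zvs sts svs a x hP]
      exact pvINV_Bstep allb zts zvs sts svs a x hP)
    intervals _ ?_
  intro kv hkv
  simp at hkv

-- ===== VERDICT (by name: the statement is the Claim_ definition above) =====
theorem zone_time_per_player_spec : Claim_equal_zone_time_per_player := by
  intro intervals zone_tl sit_tl _
  unfold Spec_zone_time_per_player
  simp only [zone_time_per_player, zone_time_per_player_alt, pvFolds_eq]
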